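-- pv_equiv track=rewrite | github.com/haesoo-y/Baekjoon_Online_Judge_Python | 01-09/1316.py | groupcount
-- ===== SOURCE A (Python) =====
-- def groupcount(x,c) :
--     while x != '':
--         if x[1:].find(x[0]) < 1:
--             x = x[1:]
--         else:
--             c += 0
--             break
--     else:
--         c += 1
--     return c
-- ===== SOURCE B (Python) =====
-- def groupcount(x, c):
--     # one pass: collect the first character of each run, then check uniqueness
--     ks = []
--     prev = None
--     for ch in x:
--         if ch != prev:
--             ks.append(ch)
--         prev = ch
--     return c + 1 if len(set(ks)) == len(ks) else c
-- ===== Notes on version B (the rewrite author's own statement) =====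
-- stated objective: alternative
-- what changed: A repeatedly peels the first character and rescans the whole remainder with find (breaking out early on a repeat); B makes a single pass collecting the first character of each run and increments the counter iff those run representatives are duplicate-free.
import Mathlib
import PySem

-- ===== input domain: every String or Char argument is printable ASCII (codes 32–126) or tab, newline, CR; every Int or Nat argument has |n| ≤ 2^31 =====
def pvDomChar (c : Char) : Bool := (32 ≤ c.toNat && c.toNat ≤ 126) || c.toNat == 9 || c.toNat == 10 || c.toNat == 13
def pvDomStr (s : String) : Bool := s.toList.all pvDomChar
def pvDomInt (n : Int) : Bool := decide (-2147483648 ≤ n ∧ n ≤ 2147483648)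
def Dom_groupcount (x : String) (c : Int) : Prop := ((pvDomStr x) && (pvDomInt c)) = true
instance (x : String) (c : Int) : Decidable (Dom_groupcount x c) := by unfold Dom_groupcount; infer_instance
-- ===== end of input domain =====

-- B replaces A's repeated peel-and-find rescans by a single pass that collects the
-- first character of each run and checks those representatives for duplicates (objective: alternative).

-- ===== PORT A =====
-- A's while loop: peel the first character while it does not reoccur strictly
-- later than position 0 of the remainder; break keeps c (c += 0), normal exit adds 1.
def groupcountGo : List Char → Int → Int
  | [], c => c + 1
  | h :: t, c => if PySem.Chars.find t [h] < 1 then groupcountGo t c else c + 0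

def groupcount (x : String) (c : Int) : Int := groupcountGo x.toList c

-- ===== PORT B =====
-- Source B's loop state: (prev, ks); append ch to ks when ch != prev, then set prev = ch.
def altStep (st : Option Char × List Char) (ch : Char) : Option Char × List Char :=
  if some ch ≠ st.1 then (some ch, st.2 ++ [ch]) else (some ch, st.2)

def groupcount_alt (x : String) (c : Int) : Int :=
  let ks := (x.toList.foldl altStep (none, [])).2
  if (PySem.Set.ofList ks).length = ks.length then c + 1 else c

-- ===== PRECONDITION & SPEC =====
def Spec_groupcount (x : String) (c : Int) (out : Int) : Prop := out = groupcount_alt x c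
instance (x : String) (c : Int) (out : Int) : Decidable (Spec_groupcount x c out) := by unfold Spec_groupcount; infer_instance

-- ===== CLAIM (what is proved, stated in full; the proofs are below) =====
def Claim_equal_groupcount : Prop := ∀ (x : String) (c : Int), Dom_groupcount x c → Spec_groupcount x c (groupcount x c)

-- ===== LEMMAS AND PROOFS =====

-- proof-side recursive view of B's one-pass run compression: first char of each run
def runRest : Char → List Char → List Char
  | _, [] => []
  | p, a :: t => if a = p then runRest p t else a :: runRest a t

def runHeads : List Char → List Char
  | [] => []
  | a :: t => a :: runRest a t

theorem runRest_subset (l : List Char) : ∀ (p x : Char), x ∈ runRest p l → x ∈ l := by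
  induction l with
  | nil => intro p x h; simp [runRest] at h
  | cons a t ih =>
    intro p x h
    by_cases hap : a = p
    · rw [runRest, if_pos hap] at h
      exact List.mem_cons_of_mem _ (ih p x h)
    · rw [runRest, if_neg hap] at h
      rcases List.mem_cons.mp h with h | h
      · exact h ▸ List.mem_cons_self
      · exact List.mem_cons_of_mem _ (ih a x h)

theorem mem_runRest (l : List Char) : ∀ (p x : Char), x ∈ l → x = p ∨ x ∈ runRest p l := by
  induction l with
  | nil => intro p x h; simp at h
  | cons a t ih =>
    intro p x h
    by_cases hap : a = p
    · rw [runRest, if_pos hap]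
      rcases List.mem_cons.mp h with h | h
      · exact Or.inl (h.trans hap)
      · exact ih p x h
    · rw [runRest, if_neg hap]
      rcases List.mem_cons.mp h with h | h
      · exact Or.inr (h ▸ List.mem_cons_self)
      · rcases ih a x h with h' | h'
        · exact Or.inr (h' ▸ List.mem_cons_self)
        · exact Or.inr (List.mem_cons_of_mem _ h')

-- B's foldl computes runRest / runHeads
theorem foldl_altStep (l : List Char) : ∀ (p : Char) (ks : List Char),
    (l.foldl altStep (some p, ks)).2 = ks ++ runRest p l := by
  induction l with
  | nil => intro p ks; simp [runRest]
  | cons a t ih =>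
    intro p ks
    by_cases hap : a = p
    · have : altStep (some p, ks) a = (some a, ks) := by
        simp [altStep, hap]
      rw [List.foldl_cons, this, ih, runRest, if_pos hap, hap]
    · have : altStep (some p, ks) a = (some a, ks ++ [a]) := by
          simp [altStep, hap]
      rw [List.foldl_cons, this, ih, runRest, if_neg hap]
      simp

theorem foldl_altStep_runHeads (l : List Char) :
    (l.foldl altStep (none, [])).2 = runHeads l := by
  cases l with
  | nil => simp [runHeads]
  | cons a t =>
    have : altStep (none, []) a = (some a, [a]) := by simp [altStep]
    rw [List.foldl_cons, this, foldl_altStep, runHeads]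
    simp

-- set(ks) has the same length as ks iff ks has no duplicates
theorem ofList_length_eq_iff (xs : List Char) :
    (PySem.Set.ofList xs).length = xs.length ↔ xs.Nodup := by
  constructor
  · intro h
    by_contra hnd
    -- show the strict inequality (ofList xs).length < xs.length
    have key : ∀ (l : List Char), ¬ l.Nodup → (PySem.Set.ofList l).length < l.length := by
      intro l
      induction l with
      | nil => intro h; exact absurd List.nodup_nil h
      | cons x t ih =>
        intro hnd2
        rw [PySem.Set.ofList_cons]
        have hle : ((PySem.Set.ofList t).discard x).length ≤ (PySem.Set.ofList t).length := by
          simpa [PySem.Set.discard] using List.length_filter_le (fun y => !y == x) (PySem.Set.ofList t)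
        by_cases hx : x ∈ t
        · have hx' : x ∈ PySem.Set.ofList t := (PySem.Set.mem_ofList t x).mpr hx
          have hlt : ((PySem.Set.ofList t).discard x).length < (PySem.Set.ofList t).length := by
            simp only [PySem.Set.discard]
            apply List.length_filter_lt_length_iff_exists.mpr
            exact ⟨x, hx', by simp⟩
          have := PySem.Set.length_ofList_le (xs := t)
          simp only [List.length_cons]
          omega
        · have hndt : ¬ t.Nodup := by
            intro hn
            exact hnd2 (List.nodup_cons.mpr ⟨hx, hn⟩)
          have := ih hndt
          simp only [List.length_cons]
          omega
    have := key xs hnd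
    omega
  · intro h
    rw [PySem.Set.ofList_eq_self_of_nodup xs h]

theorem singleton_infix_iff (a : Char) (l : List Char) : [a] <:+: l ↔ a ∈ l := by
  constructor
  · intro h; exact h.mem List.mem_cons_self
  · intro h
    rcases List.append_of_mem h with ⟨s, t, rfl⟩
    exact ⟨s, t, by simp⟩

-- the core equivalence: A's peel loop decides Nodup of the run heads
theorem groupcountGo_eq (l : List Char) (c : Int) :
    groupcountGo l c = if (runHeads l).Nodup then c + 1 else c := by
  induction l with
  | nil => simp [groupcountGo, runHeads]
  | cons h t ih =>
    have hstep : groupcountGo (h :: t) c =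
        if PySem.Chars.find t [h] < 1 then groupcountGo t c else c + 0 := rfl
    cases t with
    | nil =>
      have heq : PySem.Chars.find ([] : List Char) [h] = -1 := by
        rw [PySem.Chars.find_eq_neg_one_iff, singleton_infix_iff]; simp
      have hcond : PySem.Chars.find ([] : List Char) [h] < 1 := by omega
      rw [hstep, if_pos hcond]
      simp [groupcountGo, runHeads, runRest]
    | cons b t' =>
      by_cases hhb : h = b
      · -- next char equal: find = 0, peel; run heads unchanged
        subst hhb
        have hpre : [h] <+: (h :: t') := ⟨t', rfl⟩
        have hcond : PySem.Chars.find (h :: t') [h] < 1 := by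
          by_contra hge
          rw [not_lt] at hge
          have hnn : 0 ≤ PySem.Chars.find (h :: t') [h] := by omega
          have hspec := (PySem.Chars.find_spec hnn).2
          have h0lt : (0:Nat) < (PySem.Chars.find (h :: t') [h]).toNat := by omega
          exact hspec 0 h0lt (by simp only [List.drop_zero]; exact hpre)
        have hA : runHeads (h :: h :: t') = runHeads (h :: t') := by
          simp [runHeads, runRest]
        rw [hstep, if_pos hcond, ih, hA]
      · have hA : runHeads (h :: b :: t') = h :: runHeads (b :: t') := by
          have hbh : ¬ b = h := fun he => hhb he.symm
          rw [runHeads, runRest, if_neg hbh, runHeads]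
        by_cases hmem : h ∈ (b :: t')
        · -- reoccurs later, not adjacent: find >= 1, break with c
          have hne : PySem.Chars.find (b :: t') [h] ≠ -1 := by
            rw [PySem.Chars.find_ne_neg_one_iff, singleton_infix_iff]
            exact hmem
          have hnn : -1 ≤ PySem.Chars.find (b :: t') [h] := PySem.Chars.neg_one_le_find _ _
          have h0 : 0 ≤ PySem.Chars.find (b :: t') [h] := by omega
          have hnz : PySem.Chars.find (b :: t') [h] ≠ 0 := by
            intro h0'
            have hp := (PySem.Chars.find_spec h0).1
            rw [h0'] at hp
            simp only [Int.toNat_zero, List.drop_zero] at hp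
            rcases hp with ⟨u, hu⟩
            apply hhb
            have : h :: u = b :: t' := by simpa using hu
            exact (List.cons_eq_cons.mp this).1
          have hcond : ¬ PySem.Chars.find (b :: t') [h] < 1 := by omega
          have ht' : h ∈ t' := by
            rcases List.mem_cons.mp hmem with h' | h'
            · exact absurd h' hhb
            · exact h'
          have hmemh : h ∈ runHeads (b :: t') := by
            rw [runHeads]
            rcases mem_runRest t' b h ht' with h' | h'
            · exact absurd h' hhb
            · exact List.mem_cons_of_mem _ h'
          have hnd : ¬ (runHeads (h :: b :: t')).Nodup := by
            rw [hA]
            intro hn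
            exact (List.nodup_cons.mp hn).1 hmemh
          rw [hstep, if_neg hcond, if_neg hnd]
          omega
        · -- does not reoccur at all: find = -1, peel; new head is fresh
          have heq : PySem.Chars.find (b :: t') [h] = -1 := by
            rw [PySem.Chars.find_eq_neg_one_iff, singleton_infix_iff]
            exact hmem
          have hcond : PySem.Chars.find (b :: t') [h] < 1 := by omega
          have hnotin : h ∉ runHeads (b :: t') := by
            intro hc
            rw [runHeads] at hc
            rcases List.mem_cons.mp hc with h' | h'
            · exact hhb h'
            · exact hmem (List.mem_cons_of_mem _ (runRest_subset t' b h h'))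
          rw [hstep, if_pos hcond, ih, hA]
          by_cases hn : (runHeads (b :: t')).Nodup
          · rw [if_pos hn, if_pos (List.nodup_cons.mpr ⟨hnotin, hn⟩)]
          · rw [if_neg hn, if_neg (fun hc => hn (List.nodup_cons.mp hc).2)]

-- ===== VERDICT (by name: the statement is the Claim_ definition above) =====
theorem groupcount_spec : Claim_equal_groupcount := by
  intro x c _
  unfold Spec_groupcount groupcount groupcount_alt
  rw [groupcountGo_eq]
  simp only [foldl_altStep_runHeads]
  by_cases hn : (runHeads x.toList).Nodup
  · rw [if_pos hn]
    exact (if_pos ((ofList_length_eq_iff _).mpr hn)).symm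
  · rw [if_neg hn]
    exact (if_neg (fun hc => hn ((ofList_length_eq_iff _).mp hc))).symm
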